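-- pv_equiv track=rewrite | github.com/Maximus231/EnglishTutorTelegram | lang.py | insert_spaces_between_sentences
-- ===== SOURCE A (Python) =====
-- def insert_spaces_between_sentences(text):
-- 	# List of punctuation marks that usually denote the end of a sentence
-- 	punctuation_marks = ['.', '!', '?']
--
-- 	# Initialize an empty string to store the result
-- 	result = ''
--
-- 	# Iterate through each character in the text
-- 	for i, char in enumerate(text):
-- 		# Add the current character to the result
-- 		result += char
--
-- 		# If the current character is a punctuation mark and the next character is not a space
-- 		if char in punctuation_marks and i + 1 < len(text) and text[i + 1] != ' ':
-- 			# Add a space after the punctuation mark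
-- 			result += ' '
--
-- 	return result
-- ===== SOURCE B (Python) =====
-- def insert_spaces_between_sentences(text):
-- 	# Build the result back-to-front: scan the text right-to-left, prepending
-- 	# each character to the output built so far.  The lookahead "next
-- 	# character" is simply the first character of that output (an inserted
-- 	# space never hides it, since it goes after the punctuation mark), so no
-- 	# indexing or bounds checks are needed.
-- 	out = ''
-- 	for c in reversed(text):
-- 		if c in '.!?' and out[:1] not in ('', ' '):
-- 			out = c + ' ' + out
-- 		else:
-- 			out = c + out
-- 	return out
-- ===== Notes on version B (the rewrite author's own statement) =====
-- stated objective: alternative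
-- what changed: Builds the result back-to-front: a right-to-left pass prepends each character to the output built so far and reads the lookahead off the head of that output, eliminating enumerate, text[i+1] indexing and the bounds check.
import Mathlib
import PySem

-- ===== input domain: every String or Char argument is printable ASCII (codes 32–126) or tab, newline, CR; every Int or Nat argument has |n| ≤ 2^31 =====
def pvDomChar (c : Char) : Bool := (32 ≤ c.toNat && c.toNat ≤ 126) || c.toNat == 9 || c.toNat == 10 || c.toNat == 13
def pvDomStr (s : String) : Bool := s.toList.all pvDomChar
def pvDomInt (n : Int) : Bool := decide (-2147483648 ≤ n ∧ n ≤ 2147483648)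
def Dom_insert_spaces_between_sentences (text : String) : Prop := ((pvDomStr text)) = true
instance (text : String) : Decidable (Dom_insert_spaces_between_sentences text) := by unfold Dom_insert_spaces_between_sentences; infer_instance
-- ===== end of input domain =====

-- B builds the result back-to-front (right-to-left pass, lookahead read off the
-- head of the output built so far) instead of A's indexed left-to-right loop;
-- alternative decomposition, same behaviour.

-- ===== PORT A =====
-- A's loop body: append char, then append ' ' when char is sentence punctuation,
-- i+1 is in range and the next character is not a space.
def pvAstep (all : List Char) (result : List Char) (ic : Int × Char) : List Char :=
  let result := result ++ [ic.2]
  if ic.2 ∈ ['.', '!', '?'] ∧ ic.1 + 1 < (all.length : Int) ∧ PySem.List.pyGet? all (ic.1 + 1) ≠ some ' '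
  then result ++ [' '] else result

def insert_spaces_between_sentences (text : String) : String :=
  String.ofList ((PySem.List.enumerate text.toList).foldl (pvAstep text.toList) [])

-- ===== PORT B =====
-- B's loop body: prepend c, inserting a space when c is sentence punctuation and
-- the output built so far starts with a non-space character (out[:1] not in ('', ' ')).
def pvBstep (c : Char) (out : List Char) : List Char :=
  if c ∈ ['.', '!', '?'] ∧ out.take 1 ≠ [] ∧ out.take 1 ≠ [' '] then c :: ' ' :: out else c :: out

-- 'for c in reversed(text)' with accumulator out = a foldl over the reversed list.
def insert_spaces_between_sentences_alt (text : String) : String :=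
  String.ofList (text.toList.reverse.foldl (fun out c => pvBstep c out) [])

-- ===== PRECONDITION & SPEC =====
def Spec_insert_spaces_between_sentences (text : String) (out : String) : Prop := out = insert_spaces_between_sentences_alt text
instance (text : String) (out : String) : Decidable (Spec_insert_spaces_between_sentences text out) := by unfold Spec_insert_spaces_between_sentences; infer_instance

-- ===== CLAIM =====
def Claim_equal_insert_spaces_between_sentences : Prop := ∀ (text : String), Dom_insert_spaces_between_sentences text → Spec_insert_spaces_between_sentences text (insert_spaces_between_sentences text)

-- ===== LEMMAS AND PROOFS =====

-- B's right fold preserves the head of the input: the output starts with the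
-- same character the remaining input starts with (or is empty together with it).
lemma pvB_take1 (cs : List Char) : (cs.foldr pvBstep []).take 1 = cs.take 1 := by
  cases cs with
  | nil => rfl
  | cons c rest => simp only [List.foldr_cons, pvBstep]; split <;> simp

-- A's fold over the suffix `suf` of the full list `all = pre ++ suf`, started at
-- index pre.length, equals B's right fold over `suf`.
lemma pv_key (all : List Char) : ∀ (suf pre acc : List Char), all = pre ++ suf →
    (PySem.List.enumerate suf (pre.length : Int)).foldl (pvAstep all) acc
      = acc ++ suf.foldr pvBstep [] := by
  intro suf
  induction suf with
  | nil => intro pre acc h; simp [PySem.List.enumerate]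
  | cons c rest ih =>
    intro pre acc h
    rw [PySem.List.enumerate_cons, List.foldl_cons]
    have hstep : pvAstep all acc ((pre.length : Int), c)
        = acc ++ (if c ∈ ['.', '!', '?'] ∧ rest.take 1 ≠ [] ∧ rest.take 1 ≠ [' ']
                  then [c, ' '] else [c]) := by
      cases rest with
      | nil =>
        subst h
        simp [pvAstep]
      | cons n rest' =>
        subst h
        have hget : PySem.List.pyGet? (pre ++ c :: n :: rest') ((pre.length : Int) + 1) = some n := by
          have := PySem.List.pyGet?_append_right (pre := pre) (ys := c :: n :: rest') (k := 1)
          simpa using this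
        by_cases hn : n = ' '
        · subst hn
          simp [pvAstep, hget]
        · by_cases hc : c ∈ ['.', '!', '?'] <;>
            simp [pvAstep, hget, hc, hn]
    rw [hstep]
    have hlen : ((pre.length : Int) + 1) = (((pre ++ [c]).length : Nat) : Int) := by
      simp
    rw [hlen, ih (pre ++ [c]) _ (by simp [h])]
    rw [List.foldr_cons]
    have h1 := pvB_take1 rest
    simp only [pvBstep, h1]
    split <;> simp

-- ===== VERDICT =====
theorem insert_spaces_between_sentences_spec : Claim_equal_insert_spaces_between_sentences := by
  intro text _
  unfold Spec_insert_spaces_between_sentences insert_spaces_between_sentences insert_spaces_between_sentences_alt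
  rw [List.foldl_reverse]
  have := pv_key text.toList text.toList [] [] (by simp)
  simpa using congrArg String.ofList this
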